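-- pv_equiv track=rewrite | github.com/wisewater1/EverAfter | backend/app/core/config.py | _expand_loopback_origins
-- ===== SOURCE A (Python) =====
-- from typing import List
--
-- def _expand_loopback_origins(origins: List[str]) -> List[str]:
--     expanded: List[str] = []
--
--     for origin in origins:
--         normalized = origin.strip()
--         if not normalized:
--             continue
--         if normalized not in expanded:
--             expanded.append(normalized)
--
--         if "://localhost" in normalized:
--             loopback_variant = normalized.replace("://localhost", "://127.0.0.1", 1)
--             if loopback_variant not in expanded:
--                 expanded.append(loopback_variant)
--         elif "://127.0.0.1" in normalized:
--             localhost_variant = normalized.replace("://127.0.0.1", "://localhost", 1)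
--             if localhost_variant not in expanded:
--                 expanded.append(localhost_variant)
--
--     return expanded
-- ===== SOURCE B (Python) =====
-- from typing import List
--
-- def _expand_loopback_origins(origins: List[str]) -> List[str]:
--     # Phase 1: generate the flat candidate stream (normalized origin, then its
--     # loopback variant when one applies), in order.
--     candidates: List[str] = []
--     for origin in origins:
--         s = origin.strip()
--         if not s:
--             continue
--         candidates.append(s)
--         if "://localhost" in s:
--             candidates.append(s.replace("://localhost", "://127.0.0.1", 1))
--         elif "://127.0.0.1" in s:
--             candidates.append(s.replace("://127.0.0.1", "://localhost", 1))
--     # Phase 2: "nub by deletion" — repeatedly take the head of the remaining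
--     # stream and delete every later copy of it, so no membership test on the
--     # output is ever needed; first occurrences survive in order.
--     result: List[str] = []
--     while candidates:
--         head = candidates[0]
--         candidates = [x for x in candidates[1:] if x != head]
--         result.append(head)
--     return result
-- ===== Notes on version B (the rewrite author's own statement) =====
-- stated objective: alternative
-- what changed: A interleaves generation and dedup in one loop that tests membership in the growing output; B first materialises the flat candidate stream, then deduplicates it by repeated head-selection-and-deletion (nub by filtering the tail), so the output list is never searched.
import Mathlib
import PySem

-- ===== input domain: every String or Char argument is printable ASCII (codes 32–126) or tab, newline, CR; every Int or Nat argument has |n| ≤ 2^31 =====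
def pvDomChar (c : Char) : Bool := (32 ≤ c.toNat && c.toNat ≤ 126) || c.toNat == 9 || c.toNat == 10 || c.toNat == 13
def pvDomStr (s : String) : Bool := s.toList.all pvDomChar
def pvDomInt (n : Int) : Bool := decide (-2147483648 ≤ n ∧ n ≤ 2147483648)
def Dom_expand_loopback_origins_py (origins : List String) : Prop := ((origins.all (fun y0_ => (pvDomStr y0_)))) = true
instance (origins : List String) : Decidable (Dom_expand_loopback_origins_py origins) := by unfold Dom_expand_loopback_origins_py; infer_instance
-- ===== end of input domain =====

-- B replaces A's single interleaved loop (membership test against the growing output)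
-- by candidate-stream generation followed by nub-by-deletion; same cost, different structure.

-- s.replace(old, new, 1) for nonempty old: splice new over the FIRST occurrence of old
-- (exact: PySem.Str.find returns the first index, -1 if absent; shared by both ports).
def pvReplace1 (s old new : String) : String :=
  let i := PySem.Str.find s old
  if i = -1 then s
  else String.ofList (s.toList.take i.toNat ++ new.toList ++ s.toList.drop (i.toNat + old.toList.length))

-- ===== PORT A =====
def pvStepA (expanded : List String) (origin : String) : List String :=
  let normalized := PySem.Str.strip origin
  if normalized = "" then expanded
  else
    let expanded := if normalized ∈ expanded then expanded else expanded ++ [normalized]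
    if PySem.Str.isIn "://localhost" normalized then
      let v := pvReplace1 normalized "://localhost" "://127.0.0.1"
      if v ∈ expanded then expanded else expanded ++ [v]
    else if PySem.Str.isIn "://127.0.0.1" normalized then
      let v := pvReplace1 normalized "://127.0.0.1" "://localhost"
      if v ∈ expanded then expanded else expanded ++ [v]
    else expanded

def expand_loopback_origins_py (origins : List String) : List String :=
  origins.foldl pvStepA []

-- ===== PORT B =====
-- candidates emitted for one origin (phase 1 loop body)
def pvGen (origin : String) : List String :=
  let s := PySem.Str.strip origin
  if s = "" then []
  else if PySem.Str.isIn "://localhost" s then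
    [s, pvReplace1 s "://localhost" "://127.0.0.1"]
  else if PySem.Str.isIn "://127.0.0.1" s then
    [s, pvReplace1 s "://127.0.0.1" "://localhost"]
  else [s]

-- phase 2: take the head, delete all its later copies, recurse (Source B's while loop)
def pvNub (cs : List String) : List String :=
  match cs with
  | [] => []
  | head :: rest => head :: pvNub (rest.filter (fun x => x ≠ head))
termination_by cs.length
decreasing_by
  simp only [List.unattach, List.length_map, List.length_cons, Nat.lt_succ_iff]
  exact le_trans (List.length_filter_le _ _) (by simp)

def expand_loopback_origins_py_alt (origins : List String) : List String :=
  pvNub (origins.foldl (fun acc o => acc ++ pvGen o) [])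

-- ===== PRECONDITION & SPEC =====
def Spec_expand_loopback_origins_py (origins : List String) (out : List String) : Prop := out = expand_loopback_origins_py_alt origins
instance (origins : List String) (out : List String) : Decidable (Spec_expand_loopback_origins_py origins out) := by unfold Spec_expand_loopback_origins_py; infer_instance

-- ===== CLAIM (what is proved, stated in full; the proofs are below) =====
def Claim_equal_expand_loopback_origins_py : Prop := ∀ (origins : List String), Dom_expand_loopback_origins_py origins → Spec_expand_loopback_origins_py origins (expand_loopback_origins_py origins)

-- ===== LEMMAS AND PROOFS =====

theorem pvNub_nil : pvNub [] = [] := by rw [pvNub.eq_def]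

theorem pvNub_cons (head : String) (rest : List String) :
    pvNub (head :: rest) = head :: pvNub (rest.filter (fun x => x ≠ head)) := by
  rw [pvNub.eq_def]

-- the dedup step A performs on each candidate
def pvDedupStep (acc : List String) (c : String) : List String :=
  if c ∈ acc then acc else acc ++ [c]

theorem pvStepA_eq (acc : List String) (o : String) :
    pvStepA acc o = (pvGen o).foldl pvDedupStep acc := by
  unfold pvStepA pvGen
  by_cases h1 : PySem.Str.strip o = ""
  · simp [h1]
  · by_cases h2 : PySem.Str.isIn "://localhost" (PySem.Str.strip o) = true
    · simp_all [pvDedupStep]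
    · by_cases h3 : PySem.Str.isIn "://127.0.0.1" (PySem.Str.strip o) = true
      · simp_all [List.foldl, pvDedupStep]
      · simp_all [List.foldl, pvDedupStep]

theorem pvFoldA_eq (origins : List String) (acc : List String) :
    origins.foldl pvStepA acc = (origins.flatMap pvGen).foldl pvDedupStep acc := by
  induction origins generalizing acc with
  | nil => rfl
  | cons o rest ih =>
      simp only [List.foldl_cons, List.flatMap_cons, List.foldl_append, pvStepA_eq, ih]

theorem pvCand_eq (origins : List String) (acc : List String) :
    origins.foldl (fun acc o => acc ++ pvGen o) acc = acc ++ origins.flatMap pvGen := by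
  induction origins generalizing acc with
  | nil => simp
  | cons o rest ih => simp [List.foldl_cons, ih]

-- A's first-occurrence dedup fold equals B's nub-by-deletion on the not-yet-seen candidates
theorem pvDedup_eq_nub (n : Nat) : ∀ (cs : List String), cs.length ≤ n → ∀ acc,
    cs.foldl pvDedupStep acc = acc ++ pvNub (cs.filter (fun x => decide (x ∉ acc))) := by
  induction n with
  | zero =>
      intro cs h acc
      have : cs = [] := List.eq_nil_of_length_eq_zero (Nat.le_zero.mp h)
      subst this; simp [pvNub_nil]
  | succ n ih =>
      intro cs h acc
      match cs with
      | [] => simp [pvNub_nil]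
      | c :: rest =>
          simp only [List.length_cons, Nat.succ_le_succ_iff] at h
          by_cases hc : c ∈ acc
          · simp only [List.foldl_cons, pvDedupStep, if_pos hc, List.filter_cons,
              decide_eq_true_eq]
            rw [if_neg (by simp [hc])]
            exact ih rest h acc
          · simp only [List.foldl_cons, pvDedupStep, if_neg hc, List.filter_cons]
            rw [if_pos (by simp [hc])]
            rw [ih rest h (acc ++ [c])]
            have hfilter : rest.filter (fun x => decide (x ∉ acc ++ [c]))
                = (rest.filter (fun x => decide (x ∉ acc))).filter (fun x => decide (x ≠ c)) := by
              rw [List.filter_filter]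
              apply List.filter_congr
              intro x _
              simp only [List.mem_append, List.mem_singleton, decide_not]
              by_cases h1 : x ∈ acc <;> by_cases h2 : x = c <;> simp [h1, h2]
            rw [hfilter, pvNub_cons]
            simp
-- ===== VERDICT (by name: the statement is the Claim_ definition above) =====
theorem expand_loopback_origins_py_spec : Claim_equal_expand_loopback_origins_py := by
  intro origins _
  unfold Spec_expand_loopback_origins_py expand_loopback_origins_py expand_loopback_origins_py_alt
  rw [pvFoldA_eq, pvCand_eq, List.nil_append,
    pvDedup_eq_nub (origins.flatMap pvGen).length _ le_rfl []]
  simp
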